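-- pv_equiv track=rewrite | github.com/timothyjamesbecker/transit_alignment | alignment_algos.py | trip_set_analysis
-- ===== SOURCE A (Python) =====
-- import itertools as it
--
-- def trip_set_analysis(trips,cutoff=1):
--     T,M = {},{}
--     for t in trips:
--         T[t] = set([x[0] for x in trips[t]])
--     for i,j in it.combinations(trips.keys(),2): #set feature magnitudes-----------------------
--         F = [len(T[i].intersection(T[j])),len(T[j].union(T[i]))] #iIj,iUj => I/J = jaccard sim
--         if F[0]>=cutoff:
--             if i in M: M[i] += [F+[j]]
--             else:      M[i]  = [F+[j]]
--             if j in M: M[j] += [F+[i]]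
--             else:      M[j]  = [F+[i]]
--     return M
-- ===== SOURCE B (Python) =====
-- def trip_set_analysis(trips, cutoff=1):
--     # Inverted index feature->trips; co-occurrence counts per shared trip pair; pairs emitted in key order.
--     keys = list(trips)
--     n = len(keys)
--     pos = {}
--     for p, k in enumerate(keys):
--         pos[k] = p
--     feats = {}
--     for k in keys:
--         feats[k] = set(x[0] for x in trips[k])
--     inv = {}
--     for k in keys:
--         for f in feats[k]:
--             inv.setdefault(f, []).append(k)
--     cnt = {}
--     for owners in inv.values():
--         for a, x in enumerate(owners):
--             for y in owners[a + 1:]: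
--                 cnt[(x, y)] = cnt.get((x, y), 0) + 1
--     if cutoff > 0:
--         pairs = sorted((p for p, c in cnt.items() if c >= cutoff),
--                        key=lambda p: pos[p[0]] * n + pos[p[1]])
--     else:
--         pairs = [(x, y) for a, x in enumerate(keys) for y in keys[a + 1:]]
--     M = {}
--     for i, j in pairs:
--         inter = cnt.get((i, j), 0)
--         union = len(feats[i]) + len(feats[j]) - inter
--         M.setdefault(i, []).append([inter, union, j])
--         M.setdefault(j, []).append([inter, union, i])
--     return M
-- ===== Notes on version B (the rewrite author's own statement) =====
-- stated objective: alternative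
-- what changed: B replaces A's per-pair set intersection/union over all O(n^2) key pairs by an inverted index feature->trips with co-occurrence counting over shared pairs only (union size derived as |Ti|+|Tj|-inter), emitting the surviving pairs sorted back into A's combination order; for cutoff <= 0 it enumerates all pairs with O(1) count lookups.
import Mathlib
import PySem

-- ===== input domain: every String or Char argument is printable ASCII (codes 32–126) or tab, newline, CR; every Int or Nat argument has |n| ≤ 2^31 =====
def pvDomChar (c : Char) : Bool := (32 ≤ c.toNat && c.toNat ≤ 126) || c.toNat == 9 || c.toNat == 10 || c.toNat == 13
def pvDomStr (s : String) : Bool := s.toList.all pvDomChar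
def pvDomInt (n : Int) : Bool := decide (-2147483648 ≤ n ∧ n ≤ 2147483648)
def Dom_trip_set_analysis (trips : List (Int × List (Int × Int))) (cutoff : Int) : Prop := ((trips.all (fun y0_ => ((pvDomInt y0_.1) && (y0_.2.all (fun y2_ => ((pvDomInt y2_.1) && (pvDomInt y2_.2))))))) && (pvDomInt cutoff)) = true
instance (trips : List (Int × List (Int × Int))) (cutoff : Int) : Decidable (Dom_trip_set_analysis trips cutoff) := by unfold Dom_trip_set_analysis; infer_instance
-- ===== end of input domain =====

-- B replaces A's per-pair set intersections/unions by an inverted index feature→trips with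
-- co-occurrence counting, emitting the surviving pairs sorted back into A's combination order
-- (objective: alternative algorithm). Equality of the returned dict's item list is proved below.

-- ===== PORT A =====
-- itertools.combinations(keys, 2) yields 2-element tuples; PySem.List.combinations yields
-- 2-element lists, pvToPair reads such a list back as the pair (i, j).
def pvToPair : List Int → Int × Int
  | [i, j] => (i, j)
  | _ => (0, 0)

def trip_set_analysis (trips : List (Int × List (Int × Int))) (cutoff : Int) : List (Int × List (List Int)) :=
  -- boundary: the Python function receives `trips` as a dict
  let D := PySem.Dict.ofList trips
  -- T[t] = set([x[0] for x in trips[t]])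
  let T : PySem.Dict Int (PySem.Set Int) :=
    D.keys.foldl (fun T t => T.insert t (PySem.Set.ofList ((D.getD t []).map (fun x => x.1)))) PySem.Dict.empty
  let M : PySem.Dict Int (List (List Int)) :=
    ((PySem.List.combinations D.keys 2).map pvToPair).foldl (fun M ij =>
      let F : List Int := [((PySem.Set.inter (T.getD ij.1 []) (T.getD ij.2 [])).length : Int),
                          ((PySem.Set.union (T.getD ij.2 []) (T.getD ij.1 [])).length : Int)]
      if PySem.List.pyGetD F 0 0 ≥ cutoff then
        let M1 := if M.contains ij.1 then M.insert ij.1 (M.getD ij.1 [] ++ [F ++ [ij.2]])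
                  else M.insert ij.1 [F ++ [ij.2]]
        if M1.contains ij.2 then M1.insert ij.2 (M1.getD ij.2 [] ++ [F ++ [ij.1]])
        else M1.insert ij.2 [F ++ [ij.1]]
      else M) PySem.Dict.empty
  M.items

-- ===== PORT B =====
-- `for a, x in enumerate(l): for y in l[a+1:]` producing the pairs (x, y)
def pvPairsUp : List Int → List (Int × Int)
  | [] => []
  | x :: t => t.map (fun y => (x, y)) ++ pvPairsUp t

def trip_set_analysis_alt (trips : List (Int × List (Int × Int))) (cutoff : Int) : List (Int × List (List Int)) :=
  -- boundary: the Python function receives `trips` as a dict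
  let D := PySem.Dict.ofList trips
  let keys := D.keys
  let n : Int := (keys.length : Int)
  let pos : PySem.Dict Int Int :=
    (PySem.List.enumerate keys 0).foldl (fun d pk => d.insert pk.2 pk.1) PySem.Dict.empty
  let feats : PySem.Dict Int (PySem.Set Int) :=
    keys.foldl (fun d k => d.insert k (PySem.Set.ofList ((D.getD k []).map (fun x => x.1)))) PySem.Dict.empty
  -- inv.setdefault(f, []).append(k)  ==  inv[f] = inv.get(f, []) + [k]  ==  Dict.modify
  let inv : PySem.Dict Int (List Int) :=
    keys.foldl (fun d k => (feats.getD k []).foldl (fun d f => d.modify f [] (fun l => l ++ [k])) d) PySem.Dict.empty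
  let cnt : PySem.Dict (Int × Int) Int :=
    inv.values.foldl (fun d ow => (pvPairsUp ow).foldl (fun d xy => d.insert xy (d.getD xy 0 + 1)) d) PySem.Dict.empty
  let pairs : List (Int × Int) :=
    if cutoff > 0 then
      PySem.List.sorted ((cnt.items.filter (fun pc => pc.2 ≥ cutoff)).map (fun pc => pc.1))
        (fun p => pos.getD p.1 0 * n + pos.getD p.2 0)
    else pvPairsUp keys
  let M : PySem.Dict Int (List (List Int)) :=
    pairs.foldl (fun M ij =>
      let inter := cnt.getD ij 0
      let union := ((feats.getD ij.1 []).length : Int) + ((feats.getD ij.2 []).length : Int) - inter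
      -- M.setdefault(i, []).append([inter, union, j])  ==  Dict.modify
      let M1 := M.modify ij.1 [] (fun l => l ++ [[inter, union, ij.2]])
      M1.modify ij.2 [] (fun l => l ++ [[inter, union, ij.1]])) PySem.Dict.empty
  M.items

-- ===== PRECONDITION & SPEC =====
def Spec_trip_set_analysis (trips : List (Int × List (Int × Int))) (cutoff : Int) (out : List (Int × List (List Int))) : Prop := out = trip_set_analysis_alt trips cutoff
instance (trips : List (Int × List (Int × Int))) (cutoff : Int) (out : List (Int × List (List Int))) : Decidable (Spec_trip_set_analysis trips cutoff out) := by unfold Spec_trip_set_analysis; infer_instance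

-- ===== CLAIM (what is proved, stated in full; the proofs are below) =====
def Claim_equal_trip_set_analysis : Prop := ∀ (trips : List (Int × List (Int × Int))) (cutoff : Int), Dom_trip_set_analysis trips cutoff → Spec_trip_set_analysis trips cutoff (trip_set_analysis trips cutoff)

-- ===== LEMMAS AND PROOFS =====

-- ---------- generic list / fold lemmas ----------

theorem pv_foldl_ite_filter {α β : Type} (p : α → Bool) (u : β → α → β) (l : List α) (d : β) :
    l.foldl (fun acc x => if p x then u acc x else acc) d = (l.filter p).foldl u d := by
  induction l generalizing d with
  | nil => rfl
  | cons x t ih =>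
    by_cases h : p x = true <;> simp [h, ih]

theorem pv_foldl_foldl_flatMap {α β γ : Type} (g : α → List β) (step : γ → β → γ) (l : List α) (d : γ) :
    l.foldl (fun d x => (g x).foldl step d) d = (l.flatMap g).foldl step d := by
  induction l generalizing d with
  | nil => rfl
  | cons x t ih => simp [List.flatMap_cons, List.foldl_append, ih]

-- lookups in a dict built by a keyed insert fold
theorem pv_getD_foldl_insert_of_not_mem {κ ν β : Type} [BEq κ] [LawfulBEq κ]
    (l : List β) (key : β → κ) (val : β → ν) (d : PySem.Dict κ ν) (c : κ) (d0 : ν)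
    (hc : c ∉ l.map key) :
    (l.foldl (fun d x => d.insert (key x) (val x)) d).getD c d0 = d.getD c d0 := by
  induction l generalizing d with
  | nil => rfl
  | cons x t ih =>
    simp only [List.map_cons, List.mem_cons, not_or] at hc
    simp only [List.foldl_cons]
    rw [ih _ hc.2, PySem.Dict.getD_insert_of_ne d _ _ hc.1]

theorem pv_getD_foldl_insert_of_mem {κ ν β : Type} [BEq κ] [LawfulBEq κ]
    (l : List β) (key : β → κ) (val : β → ν) (d : PySem.Dict κ ν) (x : β) (d0 : ν)
    (hnd : (l.map key).Nodup) (hx : x ∈ l) :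
    (l.foldl (fun d x => d.insert (key x) (val x)) d).getD (key x) d0 = val x := by
  induction l generalizing d with
  | nil => cases hx
  | cons y t ih =>
    simp only [List.map_cons, List.nodup_cons] at hnd
    simp only [List.foldl_cons]
    rcases List.mem_cons.1 hx with rfl | hxt
    · rw [pv_getD_foldl_insert_of_not_mem _ key val _ _ _ hnd.1]
      exact PySem.Dict.getD_insert_self _ _ _ _
    · exact ih _ hnd.2 hxt

-- ---------- pvPairsUp facts ----------

theorem pv_mem_pairsUp {l : List Int} {p : Int × Int} (h : p ∈ pvPairsUp l) :
    p.1 ∈ l ∧ p.2 ∈ l := by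
  induction l with
  | nil => cases h
  | cons x t ih =>
    simp only [pvPairsUp, List.mem_append, List.mem_map] at h
    rcases h with ⟨y, hy, rfl⟩ | h
    · exact ⟨List.mem_cons_self, List.mem_cons_of_mem _ hy⟩
    · exact ⟨List.mem_cons_of_mem _ (ih h).1, List.mem_cons_of_mem _ (ih h).2⟩

theorem pv_mem_pairsUp_iff_sublist {l : List Int} {i j : Int} :
    (i, j) ∈ pvPairsUp l ↔ [i, j].Sublist l := by
  induction l with
  | nil => simp [pvPairsUp]
  | cons x t ih =>
    simp only [pvPairsUp, List.mem_append, List.mem_map, Prod.mk.injEq]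
    constructor
    · rintro (⟨y, hy, rfl, rfl⟩ | h)
      · exact (List.singleton_sublist.2 hy).cons₂ _
      · exact (ih.1 h).cons _
    · intro h
      rcases List.sublist_cons_iff.1 h with h | ⟨r, heq, hr⟩
      · exact Or.inr (ih.2 h)
      · injection heq with h1 h2
        subst h1; subst h2
        exact Or.inl ⟨j, List.singleton_sublist.1 hr, rfl, rfl⟩

theorem pv_nodup_pairsUp {l : List Int} (h : l.Nodup) : (pvPairsUp l).Nodup := by
  induction l with
  | nil => exact List.nodup_nil
  | cons x t ih =>
    simp only [List.nodup_cons] at h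
    refine List.Nodup.append ((h.2.map ?_)) (ih h.2) ?_
    · intro a b hab; cases hab; rfl
    · intro p hp hp'
      rcases List.mem_map.1 hp with ⟨y, _, rfl⟩
      exact h.1 (pv_mem_pairsUp hp').1

theorem pv_count_pairsUp_zero {l : List Int} {i j : Int} (h : i ∉ l) :
    (pvPairsUp l).count (i, j) = 0 :=
  List.count_eq_zero.2 (fun hm => h (pv_mem_pairsUp hm).1)

theorem pv_count_pairsUp_filter {l : List Int} (hl : l.Nodup) (pred : Int → Bool) {i j : Int}
    (hij : (i, j) ∈ pvPairsUp l) :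
    (pvPairsUp (l.filter pred)).count (i, j) = if pred i && pred j then 1 else 0 := by
  induction l with
  | nil => cases hij
  | cons x t ih =>
    simp only [List.nodup_cons] at hl
    have hmem : (j ∈ t ∧ i = x) ∨ (i, j) ∈ pvPairsUp t := by
      simpa [pvPairsUp, Prod.ext_iff, eq_comm, and_assoc] using hij
    rcases hmem with ⟨hj, rfl⟩ | hij'
    · by_cases hx : pred i = true
      · rw [List.filter_cons_of_pos hx]
        have h2 : (pvPairsUp (t.filter pred)).count (i, j) = 0 :=
          pv_count_pairsUp_zero (fun h => hl.1 (List.mem_of_mem_filter h))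
        have h1 : ((t.filter pred).map (fun y => (i, y))).count (i, j)
            = (t.filter pred).count j := by
          exact List.count_map_of_injective _ _ (fun a b hab => by cases hab; rfl) _
        by_cases hjp : pred j = true
        · rw [show pvPairsUp (i :: t.filter pred)
              = (t.filter pred).map (fun y => (i, y)) ++ pvPairsUp (t.filter pred) from rfl,
            List.count_append, h1, h2, List.count_filter hjp,
            List.count_eq_one_of_mem hl.2 hj]
          simp [hx, hjp]
        · have : (t.filter pred).count j = 0 := by
            rw [List.count_eq_zero]
            intro h
            exact hjp (List.of_mem_filter h)
          rw [show pvPairsUp (i :: t.filter pred)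
              = (t.filter pred).map (fun y => (i, y)) ++ pvPairsUp (t.filter pred) from rfl,
            List.count_append, h1, h2, this]
          simp [hjp]
      · rw [List.filter_cons_of_neg (by simpa using hx)]
        rw [pv_count_pairsUp_zero (fun h => hl.1 (List.mem_of_mem_filter h))]
        simp [hx]
    · have hi : i ≠ x := fun h => hl.1 (h ▸ (pv_mem_pairsUp hij').1)
      by_cases hx : pred x = true
      · have h1 : ((t.filter pred).map (fun y => (x, y))).count (i, j) = 0 := by
          rw [List.count_eq_zero]
          intro h
          rcases List.mem_map.1 h with ⟨y, _, hy⟩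
          exact hi (congrArg Prod.fst hy).symm
        rw [List.filter_cons_of_pos hx,
          show pvPairsUp (x :: t.filter pred)
              = (t.filter pred).map (fun y => (x, y)) ++ pvPairsUp (t.filter pred) from rfl,
          List.count_append, h1, ih hl.2 hij']
        simp
      · rw [List.filter_cons_of_neg (by simpa using hx)]
        exact ih hl.2 hij'

-- ---------- A's per-key update equals B's ----------

theorem pv_upd_eq {M : PySem.Dict Int (List (List Int))} {i : Int} {v : List Int} :
    (if M.contains i then M.insert i (M.getD i [] ++ [v]) else M.insert i [v])
      = M.modify i [] (fun l => l ++ [v]) := by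
  by_cases h : M.contains i = true
  · simp [PySem.Dict.modify, h]
  · simp only [Bool.not_eq_true] at h
    simp [PySem.Dict.modify, h, PySem.Dict.getD_of_not_contains _ _ h]

-- ---------- the main proof ----------

-- mirrors of the two ports' internal stages, with the per-key feature set abstracted as `S`
def pvS (D : PySem.Dict Int (List (Int × Int))) : Int → PySem.Set Int :=
  fun k => PySem.Set.ofList ((D.getD k []).map (fun x => x.1))

def pvFeats (keys : List Int) (S : Int → PySem.Set Int) : PySem.Dict Int (PySem.Set Int) :=
  keys.foldl (fun d k => d.insert k (S k)) PySem.Dict.empty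

def pvInterLen (S : Int → PySem.Set Int) (ij : Int × Int) : Int :=
  ((PySem.Set.inter (S ij.1) (S ij.2)).length : Int)

def pvUnionLen (S : Int → PySem.Set Int) (ij : Int × Int) : Int :=
  ((PySem.Set.union (S ij.2) (S ij.1)).length : Int)

def pvUpd (S : Int → PySem.Set Int) (M : PySem.Dict Int (List (List Int))) (ij : Int × Int) :
    PySem.Dict Int (List (List Int)) :=
  (M.modify ij.1 [] (fun l => l ++ [[pvInterLen S ij, pvUnionLen S ij, ij.2]])).modify ij.2 []
    (fun l => l ++ [[pvInterLen S ij, pvUnionLen S ij, ij.1]])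

def pvCanon (keys : List Int) (S : Int → PySem.Set Int) (cutoff : Int) : List (Int × List (List Int)) :=
  (((pvPairsUp keys).filter (fun ij => decide (pvInterLen S ij ≥ cutoff))).foldl (pvUpd S)
    PySem.Dict.empty).items

def pvARes (keys : List Int) (S : Int → PySem.Set Int) (cutoff : Int) : List (Int × List (List Int)) :=
  (((PySem.List.combinations keys 2).map pvToPair).foldl (fun M ij =>
      let F : List Int := [((PySem.Set.inter ((pvFeats keys S).getD ij.1 []) ((pvFeats keys S).getD ij.2 [])).length : Int),
                          ((PySem.Set.union ((pvFeats keys S).getD ij.2 []) ((pvFeats keys S).getD ij.1 [])).length : Int)]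
      if PySem.List.pyGetD F 0 0 ≥ cutoff then
        let M1 := if M.contains ij.1 then M.insert ij.1 (M.getD ij.1 [] ++ [F ++ [ij.2]])
                  else M.insert ij.1 [F ++ [ij.2]]
        if M1.contains ij.2 then M1.insert ij.2 (M1.getD ij.2 [] ++ [F ++ [ij.1]])
        else M1.insert ij.2 [F ++ [ij.1]]
      else M) PySem.Dict.empty).items

def pvInv (keys : List Int) (S : Int → PySem.Set Int) : PySem.Dict Int (List Int) :=
  keys.foldl (fun d k => ((pvFeats keys S).getD k []).foldl (fun d f => d.modify f [] (fun l => l ++ [k])) d)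
    PySem.Dict.empty

def pvCnt (keys : List Int) (S : Int → PySem.Set Int) : PySem.Dict (Int × Int) Int :=
  (pvInv keys S).values.foldl (fun d ow => (pvPairsUp ow).foldl (fun d xy => d.insert xy (d.getD xy 0 + 1)) d)
    PySem.Dict.empty

def pvPos (keys : List Int) : PySem.Dict Int Int :=
  (PySem.List.enumerate keys 0).foldl (fun d pk => d.insert pk.2 pk.1) PySem.Dict.empty

def pvBRes (keys : List Int) (S : Int → PySem.Set Int) (cutoff : Int) : List (Int × List (List Int)) :=
  let pairs : List (Int × Int) :=
    if cutoff > 0 then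
      PySem.List.sorted (((pvCnt keys S).items.filter (fun pc => pc.2 ≥ cutoff)).map (fun pc => pc.1))
        (fun p => (pvPos keys).getD p.1 0 * ((keys.length : Int)) + (pvPos keys).getD p.2 0)
    else pvPairsUp keys
  (pairs.foldl (fun M ij =>
      let inter := (pvCnt keys S).getD ij 0
      let union := (((pvFeats keys S).getD ij.1 []).length : Int) + (((pvFeats keys S).getD ij.2 []).length : Int) - inter
      let M1 := M.modify ij.1 [] (fun l => l ++ [[inter, union, ij.2]])
      M1.modify ij.2 [] (fun l => l ++ [[inter, union, ij.1]])) PySem.Dict.empty).items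

def pvOwn (keys : List Int) (S : Int → PySem.Set Int) (f : Int) : List Int :=
  keys.filter (fun k => (S k).contains f)

def pvFlatKF (keys : List Int) (S : Int → PySem.Set Int) : List (Int × Int) :=
  keys.flatMap (fun k => (S k).map (fun f => (f, k)))

def pvAllF (keys : List Int) (S : Int → PySem.Set Int) : List Int :=
  PySem.Set.ofList (keys.flatMap (fun k => (S k : List Int)))

def pvFlatPairs (keys : List Int) (S : Int → PySem.Set Int) : List (Int × Int) :=
  (pvAllF keys S).flatMap (fun f => pvPairsUp (pvOwn keys S f))

theorem pv_comb2 (l : List Int) : (PySem.List.combinations l 2).map pvToPair = pvPairsUp l := by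
  induction l with
  | nil => rfl
  | cons x t ih =>
    rw [show (2 : Nat) = 1 + 1 from rfl] at *
    rw [PySem.List.combinations_cons_succ, List.map_append, ih, PySem.List.combinations_one]
    simp [pvToPair, pvPairsUp, List.map_map, Function.comp_def]

theorem pv_foldl_ite_filter' {α β : Type} (p : α → Prop) [DecidablePred p] (u : β → α → β)
    (l : List α) (d : β) :
    l.foldl (fun acc x => if p x then u acc x else acc) d = (l.filter (fun x => decide (p x))).foldl u d := by
  rw [← pv_foldl_ite_filter (fun x => decide (p x)) u l d]
  refine PySem.List.foldl_congr_mem _ _ _ _ ?_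
  intro acc x _
  by_cases h : p x <;> simp [h]

theorem pv_length_filter_split {α : Type} (l : List α) (p : α → Bool) :
    (l.filter p).length + (l.filter (fun x => !p x)).length = l.length := by
  induction l with
  | nil => rfl
  | cons x t ih => by_cases h : p x = true <;> simp [h, ← ih] <;> omega

theorem pv_feats_getD (keys : List Int) (S : Int → PySem.Set Int) (hnd : keys.Nodup)
    {k : Int} (hk : k ∈ keys) : (pvFeats keys S).getD k [] = S k :=
  pv_getD_foldl_insert_of_mem keys (fun x => x) S PySem.Dict.empty k [] (by simpa using hnd) hk

theorem pv_inv_eq_flat (keys : List Int) (S : Int → PySem.Set Int) (hnd : keys.Nodup) :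
    pvInv keys S = (pvFlatKF keys S).foldl (fun d p => d.modify p.1 [] (fun l => l ++ [p.2]))
      PySem.Dict.empty := by
  unfold pvInv pvFlatKF
  rw [← pv_foldl_foldl_flatMap]
  refine PySem.List.foldl_congr_mem _ _ _ _ ?_
  intro d k hk
  rw [pv_feats_getD keys S hnd hk, List.foldl_map]

theorem pv_own_eq (keys : List Int) (S : Int → PySem.Set Int) (hSnd : ∀ k, (S k).Nodup) (f : Int) :
    ((pvFlatKF keys S).filter (fun p => p.1 == f)).map (fun p => p.2) = pvOwn keys S f := by
  unfold pvFlatKF pvOwn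
  induction keys with
  | nil => rfl
  | cons k t ih =>
    rw [List.flatMap_cons, List.filter_append, List.map_append, ih, List.filter_cons]
    have h1 : (((S k).map (fun f' => (f', k))).filter (fun p => p.1 == f)).map (fun p => p.2)
        = if (S k).contains f then [k] else [] := by
      rw [List.filter_map]
      have : ((fun p : Int × Int => p.1 == f) ∘ fun f' => (f', k)) = fun f' => f' == f := rfl
      rw [this]
      have : (S k).filter (fun f' => f' == f) = List.replicate ((S k).count f) f := by
        simpa using List.filter_eq (l := (S k : List Int)) f
      rw [this]
      by_cases hf : f ∈ (S k : List Int)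
      · rw [List.count_eq_one_of_mem (hSnd k) hf]
        simp [hf]
      · rw [List.count_eq_zero.2 hf]
        simp [hf]
    rw [h1]
    by_cases hc : (S k).contains f = true
    · simp [(PySem.Set.contains_iff _ _).1 hc]
    · have hf : f ∉ (S k : List Int) := fun h => hc ((PySem.Set.contains_iff _ _).2 h)
      simp [hf]

theorem pv_inv_getD (keys : List Int) (S : Int → PySem.Set Int) (hnd : keys.Nodup)
    (hSnd : ∀ k, (S k).Nodup) (f : Int) : (pvInv keys S).getD f [] = pvOwn keys S f := by
  rw [pv_inv_eq_flat keys S hnd, PySem.Dict.getD_foldl_modify_append, PySem.Dict.getD_empty,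
    List.nil_append, pv_own_eq keys S hSnd f]

theorem pv_inv_keys (keys : List Int) (S : Int → PySem.Set Int) (hnd : keys.Nodup) :
    (pvInv keys S).keys = pvAllF keys S := by
  rw [pv_inv_eq_flat keys S hnd]
  rw [PySem.Dict.keys_foldl_modify_key (pvFlatKF keys S) (fun p => p.1) []
    (fun _ p => fun l => l ++ [p.2]) PySem.Dict.empty]
  rw [show (PySem.Dict.empty : PySem.Dict Int (List Int)).keys = [] from rfl,
    PySem.Set.update_nil_left]
  unfold pvAllF pvFlatKF
  rw [List.map_flatMap]
  simp [List.map_map, Function.comp_def]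

theorem pv_cnt_eq_flat (keys : List Int) (S : Int → PySem.Set Int) (hnd : keys.Nodup)
    (hSnd : ∀ k, (S k).Nodup) :
    pvCnt keys S = (pvFlatPairs keys S).foldl (fun d xy => d.insert xy (d.getD xy 0 + 1))
      PySem.Dict.empty := by
  have hv : (pvInv keys S).values = (pvAllF keys S).map (pvOwn keys S) := by
    rw [PySem.Dict.values_eq_map_keys (pvInv keys S)
      (by rw [pv_inv_keys keys S hnd]; exact PySem.Set.nodup_ofList _) []]
    rw [pv_inv_keys keys S hnd]
    exact List.map_congr_left (fun f _ => pv_inv_getD keys S hnd hSnd f)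
  unfold pvCnt pvFlatPairs
  rw [hv]
  simp only [List.foldl_map]
  rw [pv_foldl_foldl_flatMap]

theorem pv_cnt_getD (keys : List Int) (S : Int → PySem.Set Int) (hnd : keys.Nodup)
    (hSnd : ∀ k, (S k).Nodup) (ij : Int × Int) :
    (pvCnt keys S).getD ij 0 = ((pvFlatPairs keys S).count ij : Int) := by
  rw [pv_cnt_eq_flat keys S hnd hSnd, PySem.Dict.getD_foldl_insert_add_one,
    PySem.Dict.getD_empty, zero_add]

theorem pv_flat_count (keys : List Int) (S : Int → PySem.Set Int) (hnd : keys.Nodup)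
    {ij : Int × Int} (hij : ij ∈ pvPairsUp keys) :
    (pvFlatPairs keys S).count ij
      = ((pvAllF keys S).filter (fun f => (S ij.1).contains f && (S ij.2).contains f)).length := by
  obtain ⟨i, j⟩ := ij
  unfold pvFlatPairs
  generalize pvAllF keys S = L
  induction L with
  | nil => rfl
  | cons f t ih =>
    rw [List.flatMap_cons, List.count_append, List.filter_cons, ih]
    have := pv_count_pairsUp_filter hnd (fun k => (S k).contains f) hij
    unfold pvOwn
    rw [this]
    by_cases h1 : f ∈ (S i : List Int) <;> by_cases h2 : f ∈ (S j : List Int) <;>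
      simp [h1, h2] <;> omega

theorem pv_inter_of_mem (keys : List Int) (S : Int → PySem.Set Int)
    (hSnd : ∀ k, (S k).Nodup) {ij : Int × Int} (hij : ij ∈ pvPairsUp keys) :
    ((pvAllF keys S).filter (fun f => (S ij.1).contains f && (S ij.2).contains f)).length
      = (PySem.Set.inter (S ij.1) (S ij.2)).length := by
  obtain ⟨hi, hj⟩ := pv_mem_pairsUp hij
  refine List.Perm.length_eq ?_
  refine (List.perm_ext_iff_of_nodup ((PySem.Set.nodup_ofList _).filter _)
    (PySem.Set.nodup_inter _ _ (hSnd _))).2 ?_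
  intro f
  rw [List.mem_filter, PySem.Set.mem_inter]
  constructor
  · rintro ⟨_, h⟩
    simp only [Bool.and_eq_true, PySem.Set.contains_iff] at h
    exact h
  · rintro ⟨h1, h2⟩
    refine ⟨(PySem.Set.mem_ofList _ _).2 (List.mem_flatMap.2 ⟨ij.1, hi, h1⟩), ?_⟩
    simp only [Bool.and_eq_true, PySem.Set.contains_iff]
    exact ⟨h1, h2⟩

theorem pv_cnt_val (keys : List Int) (S : Int → PySem.Set Int) (hnd : keys.Nodup)
    (hSnd : ∀ k, (S k).Nodup) {ij : Int × Int} (hij : ij ∈ pvPairsUp keys) :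
    (pvCnt keys S).getD ij 0 = pvInterLen S ij := by
  rw [pv_cnt_getD keys S hnd hSnd, pv_flat_count keys S hnd hij, pv_inter_of_mem keys S hSnd hij]
  rfl

theorem pv_union_val (S : Int → PySem.Set Int) (hSnd : ∀ k, (S k).Nodup) (ij : Int × Int) :
    pvUnionLen S ij = ((S ij.1 : List Int).length : Int) + ((S ij.2 : List Int).length : Int)
      - pvInterLen S ij := by
  unfold pvUnionLen pvInterLen
  rw [show PySem.Set.union (S ij.2) (S ij.1) = (S ij.2).update (S ij.1) from rfl,
    PySem.Set.update_eq_append_filter, PySem.Set.ofList_eq_self_of_nodup _ (hSnd _)]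
  have hsplit := pv_length_filter_split (S ij.1 : List Int) (fun y => (S ij.2).contains y)
  rw [show PySem.Set.inter (S ij.1) (S ij.2)
      = (S ij.1 : List Int).filter (fun y => (S ij.2).contains y) from rfl]
  rw [List.length_append]
  omega

theorem pv_pos_getD (keys : List Int) (hnd : keys.Nodup) {u : Nat} (hu : u < keys.length) :
    (pvPos keys).getD keys[u] 0 = (u : Int) := by
  have hm : ((u : Int), keys[u]) ∈ PySem.List.enumerate keys 0 :=
    (PySem.List.mem_enumerate_iff keys 0 _).2 ⟨u, hu, by simp⟩
  have hnd' : ((PySem.List.enumerate keys 0).map (fun pk => pk.2)).Nodup := by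
    rw [PySem.List.map_snd_enumerate]; exact hnd
  exact pv_getD_foldl_insert_of_mem (PySem.List.enumerate keys 0) (fun pk => pk.2)
    (fun pk => pk.1) PySem.Dict.empty ((u : Int), keys[u]) 0 hnd' hm

theorem pv_pairsUp_map (l : List Int) (f : Int → Int) :
    pvPairsUp (l.map f) = (pvPairsUp l).map (fun p => (f p.1, f p.2)) := by
  induction l with
  | nil => rfl
  | cons x t ih =>
    simp [pvPairsUp, ih, List.map_map, Function.comp_def]

theorem pv_pairsUp_pyRange_pairwise (N : Int) :
    ∀ (m : Nat) (a : Int), 0 ≤ a → (N - a).toNat = m →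
    (pvPairsUp (PySem.List.pyRange a N 1)).Pairwise
      (fun p q => p.1 * N + p.2 < q.1 * N + q.2) := by
  intro m
  induction m with
  | zero =>
    intro a _ hm
    rw [PySem.List.pyRange_one_eq_nil (by omega)]
    exact List.Pairwise.nil
  | succ m ih =>
    intro a ha hm
    by_cases hab : a < N
    · rw [PySem.List.pyRange_one_cons hab]
      rw [show pvPairsUp (a :: PySem.List.pyRange (a+1) N 1)
          = (PySem.List.pyRange (a+1) N 1).map (fun y => (a, y))
            ++ pvPairsUp (PySem.List.pyRange (a+1) N 1) from rfl]
      have hbound : ∀ q ∈ pvPairsUp (PySem.List.pyRange (a+1) N 1),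
          a + 1 ≤ q.1 ∧ q.1 < N ∧ a + 1 ≤ q.2 ∧ q.2 < N := by
        intro q hq
        obtain ⟨h1, h2⟩ := pv_mem_pairsUp hq
        rw [PySem.List.mem_pyRange_one] at h1 h2
        exact ⟨h1.1, h1.2, h2.1, h2.2⟩
      refine List.pairwise_append.2 ⟨?_, ih (a+1) (by omega) (by omega), ?_⟩
      · rw [List.pairwise_map]
        refine (PySem.List.pairwise_lt_pyRange_one (a+1) N).imp ?_
        intro y z h
        show a * N + y < a * N + z
        omega
      · rintro ⟨a', y⟩ hp q hq
        rcases List.mem_map.1 hp with ⟨y', hy', heq⟩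
        injection heq with h1 h2
        subst h1; subst h2
        rw [PySem.List.mem_pyRange_one] at hy'
        obtain ⟨hq1, hq2, hq3, hq4⟩ := hbound q hq
        have hN : 0 < N := by omega
        have : (a + 1) * N ≤ q.1 * N := by
          exact mul_le_mul_of_nonneg_right hq1 (by omega)
        nlinarith
    · rw [PySem.List.pyRange_one_eq_nil (by omega)]
      exact List.Pairwise.nil

theorem pv_pairsUp_pairwise_key (keys : List Int) (hnd : keys.Nodup) :
    (pvPairsUp keys).Pairwise (fun p q =>
      (pvPos keys).getD p.1 0 * ((keys.length : Int)) + (pvPos keys).getD p.2 0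
        < (pvPos keys).getD q.1 0 * ((keys.length : Int)) + (pvPos keys).getD q.2 0) := by
  have hrepr : (PySem.List.pyRange 0 ((keys.length : Int)) 1).map
      (fun j => PySem.List.pyGetD keys j 0) = keys := by
    have := PySem.List.map_pyGetD_pyRange_zero keys 0
    simpa [PySem.List.len_eq] using this
  have base := pv_pairsUp_pyRange_pairwise ((keys.length : Int)) keys.length 0 le_rfl (by omega)
  have hPU : pvPairsUp keys
      = (pvPairsUp (PySem.List.pyRange 0 ((keys.length : Int)))).map
          (fun p => (PySem.List.pyGetD keys p.1 0, PySem.List.pyGetD keys p.2 0)) := by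
    conv_lhs => rw [← hrepr]
    exact pv_pairsUp_map _ _
  rw [hPU, List.pairwise_map]
  have hmem : ∀ p ∈ pvPairsUp (PySem.List.pyRange 0 ((keys.length : Int)) 1),
      (pvPos keys).getD (PySem.List.pyGetD keys p.1 0) 0 = p.1
        ∧ (pvPos keys).getD (PySem.List.pyGetD keys p.2 0) 0 = p.2 := by
    intro p hp
    obtain ⟨h1, h2⟩ := pv_mem_pairsUp hp
    rw [PySem.List.mem_pyRange_one] at h1 h2
    constructor
    · rw [PySem.List.pyGetD_eq_getElem keys 0 h1.1 h1.2,
        pv_pos_getD keys hnd (by omega : p.1.toNat < keys.length)]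
      omega
    · rw [PySem.List.pyGetD_eq_getElem keys 0 h2.1 h2.2,
        pv_pos_getD keys hnd (by omega : p.2.toNat < keys.length)]
      omega
  refine base.imp_of_mem ?_
  intro p q hp hq h
  obtain ⟨hp1, hp2⟩ := hmem p hp
  obtain ⟨hq1, hq2⟩ := hmem q hq
  rw [hp1, hp2, hq1, hq2]
  exact h

theorem pv_flat_sub (keys : List Int) (S : Int → PySem.Set Int) {p : Int × Int}
    (hp : p ∈ pvFlatPairs keys S) : p ∈ pvPairsUp keys := by
  obtain ⟨f, _, hmem⟩ := List.mem_flatMap.1 hp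
  obtain ⟨i, j⟩ := p
  exact pv_mem_pairsUp_iff_sublist.2
    ((pv_mem_pairsUp_iff_sublist.1 hmem).trans List.filter_sublist)

theorem pv_pairs_eq (keys : List Int) (S : Int → PySem.Set Int) (cutoff : Int)
    (hnd : keys.Nodup) (hSnd : ∀ k, (S k).Nodup) :
    (if cutoff > 0 then
      PySem.List.sorted (((pvCnt keys S).items.filter (fun pc => pc.2 ≥ cutoff)).map (fun pc => pc.1))
        (fun p => (pvPos keys).getD p.1 0 * ((keys.length : Int)) + (pvPos keys).getD p.2 0)
    else pvPairsUp keys)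
      = (pvPairsUp keys).filter (fun ij => decide (pvInterLen S ij ≥ cutoff)) := by
  by_cases hc : cutoff > 0
  · rw [if_pos hc]
    have hckeys : (pvCnt keys S).keys = PySem.Set.ofList (pvFlatPairs keys S) := by
      rw [pv_cnt_eq_flat keys S hnd hSnd,
        PySem.Dict.keys_foldl_insert (pvFlatPairs keys S) (fun d x => d.getD x 0 + 1) PySem.Dict.empty,
        show (PySem.Dict.empty : PySem.Dict (Int × Int) Int).keys = [] from rfl,
        PySem.Set.update_nil_left]
    have hcnd : (pvCnt keys S).keys.Nodup := by
      rw [hckeys]; exact PySem.Set.nodup_ofList _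
    have hitems : (pvCnt keys S).items
        = (pvCnt keys S).keys.map (fun p => (p, (pvCnt keys S).getD p 0)) :=
      PySem.Dict.items_eq_map_keys _ hcnd 0
    rw [hitems, List.filter_map, List.map_map]
    rw [show ((fun pc : (Int × Int) × Int => pc.1) ∘ (fun p => (p, (pvCnt keys S).getD p 0)))
        = id from rfl, List.map_id]
    refine PySem.List.sorted_eq_of_perm_of_pairwise_lt _ _ _ ?_ ?_
    · refine (List.perm_ext_iff_of_nodup ((pv_nodup_pairsUp hnd).filter _)
        (hcnd.filter _)).2 ?_
      intro p
      rw [List.mem_filter, List.mem_filter, hckeys, PySem.Set.mem_ofList]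
      simp only [Function.comp_apply, decide_eq_true_eq, ge_iff_le]
      constructor
      · rintro ⟨hmem, hpass⟩
        refine ⟨?_, ?_⟩
        · have : (0 : Int) < (pvCnt keys S).getD p 0 := by
            rw [pv_cnt_val keys S hnd hSnd hmem] at *
            have h0 : (0 : Int) ≤ pvInterLen S p := by
              unfold pvInterLen; exact Int.natCast_nonneg _
            omega
          rw [pv_cnt_getD keys S hnd hSnd] at this
          exact List.count_pos_iff.1 (by exact_mod_cast this)
        · rwa [pv_cnt_val keys S hnd hSnd hmem]
      · rintro ⟨hmem, hpass⟩
        have hmem' := pv_flat_sub keys S hmem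
        exact ⟨hmem', by rwa [pv_cnt_val keys S hnd hSnd hmem'] at hpass⟩
    · exact List.Pairwise.sublist List.filter_sublist (pv_pairsUp_pairwise_key keys hnd)
  · rw [if_neg hc]
    refine (List.filter_eq_self.2 ?_).symm
    intro ij _
    have h0 : (0 : Int) ≤ pvInterLen S ij := by
      unfold pvInterLen; exact Int.natCast_nonneg _
    exact decide_eq_true (by omega)

theorem pv_AB (keys : List Int) (hnd : keys.Nodup) (S : Int → PySem.Set Int)
    (hSnd : ∀ k, (S k).Nodup) (cutoff : Int) :
    pvARes keys S cutoff = pvBRes keys S cutoff := by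
  simp only [pvARes, pvBRes]
  rw [pv_comb2, pv_pairs_eq keys S cutoff hnd hSnd]
  refine congrArg PySem.Dict.items ?_
  rw [PySem.List.foldl_congr_mem (pvPairsUp keys) _
    (fun M ij => if pvInterLen S ij ≥ cutoff then pvUpd S M ij else M) PySem.Dict.empty ?hA]
  case hA =>
    intro M ij hij
    obtain ⟨h1, h2⟩ := pv_mem_pairsUp hij
    simp only [pv_feats_getD keys S hnd h1, pv_feats_getD keys S hnd h2,
      PySem.List.pyGetD_zero_cons, pv_upd_eq, List.cons_append, List.nil_append]
    rfl
  rw [pv_foldl_ite_filter' (fun ij => pvInterLen S ij ≥ cutoff) (pvUpd S) (pvPairsUp keys)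
    PySem.Dict.empty]
  refine PySem.List.foldl_congr_mem _ _ (pvUpd S) _ ?_ |>.symm
  intro M ij hij
  have hmem := (List.mem_filter.1 hij).1
  obtain ⟨h1, h2⟩ := pv_mem_pairsUp hmem
  simp only [pv_cnt_val keys S hnd hSnd hmem, pv_feats_getD keys S hnd h1,
    pv_feats_getD keys S hnd h2]
  rw [← pv_union_val S hSnd ij]
  rfl

theorem pv_main (trips : List (Int × List (Int × Int))) (cutoff : Int) :
    trip_set_analysis trips cutoff = trip_set_analysis_alt trips cutoff := by
  have e1 : trip_set_analysis trips cutoff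
      = pvARes (PySem.Dict.ofList trips).keys (pvS (PySem.Dict.ofList trips)) cutoff := rfl
  have e2 : trip_set_analysis_alt trips cutoff
      = pvBRes (PySem.Dict.ofList trips).keys (pvS (PySem.Dict.ofList trips)) cutoff := rfl
  rw [e1, e2]
  exact pv_AB _ (PySem.Dict.nodup_keys_ofList trips) _ (fun k => PySem.Set.nodup_ofList _) cutoff


-- ===== VERDICT (by name: the statement is the Claim_ definition above) =====
theorem trip_set_analysis_spec : Claim_equal_trip_set_analysis := by
  intro trips cutoff _
  exact (pv_main trips cutoff).symm ▸ rfl
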